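-- pv_equiv track=rewrite | github.com/arvind-k06/LeetCode-Exercises | Special Keyboard - GFG/special-keyboard.py | optimalKeys
-- ===== SOURCE A (Python) =====
-- def optimalKeys(N):
--
--     if N<=6:
--         return N
--
--     d = [0]*(N)
--
--     for i in range(1, 7):
--         d[i-1] = i
--
--     for n in range(7,N+1):
--
--         for b in range(n-3, 0, -1):
--             c = (n-b-1)*d[b-1]
--             d[n-1] = max(c, d[n-1])
--
--     return d[N-1]
-- ===== SOURCE B (Python) =====
-- def optimalKeys(N):
--     # O(N) sliding-window DP: the optimal last Ctrl-A,C,V...V block always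
--     # multiplies the value from 4 or 5 keystrokes earlier by 3 or 4.
--     if N <= 6:
--         return N
--     a, b, c, d, e = 2, 3, 4, 5, 6   # best values for 2..6 keystrokes
--     for _ in range(7, N + 1):
--         a, b, c, d, e = b, c, d, e, max(3 * b, 4 * a)
--     return e
-- ===== Notes on version B (the rewrite author's own statement) =====
-- stated objective: faster
-- what changed: Replaced the quadratic table DP that rescans every breakpoint b for each n by a linear-time, constant-space sliding window using the fact that the optimal last paste block multiplies the value four or five keystrokes back by three or four (f(n) = max of thrice f(n-4) and four times f(n-5)).
import Mathlib
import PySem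

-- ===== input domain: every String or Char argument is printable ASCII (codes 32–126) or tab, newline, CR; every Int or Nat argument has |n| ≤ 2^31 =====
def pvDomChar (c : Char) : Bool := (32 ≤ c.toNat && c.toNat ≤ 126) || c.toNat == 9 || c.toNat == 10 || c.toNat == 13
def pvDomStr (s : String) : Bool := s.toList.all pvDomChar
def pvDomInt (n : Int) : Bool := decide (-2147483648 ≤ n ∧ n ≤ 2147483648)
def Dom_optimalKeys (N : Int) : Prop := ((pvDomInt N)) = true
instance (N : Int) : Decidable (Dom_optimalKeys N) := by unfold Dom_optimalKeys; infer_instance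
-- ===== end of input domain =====

-- B replaces A's O(N^2) breakpoint scan by an O(N), constant-space sliding-window DP
-- (f(n) = max(3*f(n-4), 4*f(n-5))); proved to return the same value for every Int N.


-- ===== PORT A =====
def optimalKeys (N : Int) : Int :=
  if N ≤ 6 then N
  else
    let d0 := List.replicate N.toNat (0 : Int)
    let d1 := (PySem.List.pyRange 1 7 1).foldl (fun d i => PySem.List.pySetD d (i - 1) i) d0
    let d2 := (PySem.List.pyRange 7 (N + 1) 1).foldl (fun d n =>
        (PySem.List.pyRange (n - 3) 0 (-1)).foldl (fun d b =>
          let c := (n - b - 1) * PySem.List.pyGetD d (b - 1) 0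
          PySem.List.pySetD d (n - 1) (max c (PySem.List.pyGetD d (n - 1) 0))) d) d1
    PySem.List.pyGetD d2 (N - 1) 0

-- ===== PORT B =====
def altLoop : Nat → Int × Int × Int × Int × Int → Int × Int × Int × Int × Int
  | 0, s => s
  | k + 1, (a, b, c, d, e) => altLoop k (b, c, d, e, max (3 * b) (4 * a))

def optimalKeys_alt (N : Int) : Int :=
  if N ≤ 6 then N
  else (altLoop (N + 1 - 7).toNat (2, 3, 4, 5, 6)).2.2.2.2

-- ===== PRECONDITION & SPEC =====
def Spec_optimalKeys (N : Int) (out : Int) : Prop := out = optimalKeys_alt N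
instance (N : Int) (out : Int) : Decidable (Spec_optimalKeys N out) := by unfold Spec_optimalKeys; infer_instance

-- ===== CLAIM (what is proved, stated in full; the proofs are below) =====
def Claim_equal_optimalKeys : Prop := ∀ (N : Int), Dom_optimalKeys N → Spec_optimalKeys N (optimalKeys N)

-- ===== LEMMAS AND PROOFS =====

def G : Nat → Int
  | 0 => 0 | 1 => 1 | 2 => 2 | 3 => 3 | 4 => 4 | 5 => 5 | 6 => 6
  | n + 7 => max (3 * G (n + 3)) (4 * G (n + 2))

theorem G_nonneg (n : Nat) : 0 ≤ G n := by
  induction n using G.induct <;> simp [G] <;>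
    first
    | rfl
    | (rename_i h1 h2; left; nlinarith)

theorem G_eq {n : Nat} (h : 7 ≤ n) : G n = max (3 * G (n - 4)) (4 * G (n - 5)) := by
  obtain ⟨m, rfl⟩ : ∃ m, n = m + 7 := ⟨n - 7, by omega⟩
  have h4 : m + 7 - 4 = m + 3 := by omega
  have h5 : m + 7 - 5 = m + 2 := by omega
  rw [h4, h5]; simp [G]

theorem G_ratio {k : Nat} (h : 3 ≤ k) : 2 * G (k + 1) ≤ 3 * G k := by
  induction k using Nat.strong_induction_on with
  | _ k IH =>
    by_cases hk : k ≤ 6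
    · interval_cases k <;> decide
    · obtain ⟨m, rfl⟩ : ∃ m, k = m + 7 := ⟨k - 7, by omega⟩
      have IH3 : 2 * G (m + 4) ≤ 3 * G (m + 3) := by
        have := IH (m + 3) (by omega) (by omega); simpa using this
      have h1 : 0 ≤ G (m + 3) := G_nonneg _
      have e1 : G (m + 7 + 1) = max (3 * G (m + 4)) (4 * G (m + 3)) := by
        have := G_eq (n := m + 8) (by omega)
        have h4 : m + 8 - 4 = m + 4 := by omega
        have h5 : m + 8 - 5 = m + 3 := by omega
        rw [h4, h5] at this; simpa using this
      have e2 : G (m + 7) = max (3 * G (m + 3)) (4 * G (m + 2)) := by simp [G]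
      rw [e1, e2]
      have hml := le_max_left (3 * G (m + 3)) (4 * G (m + 2))
      rcases max_cases (3 * G (m + 4)) (4 * G (m + 3)) with ⟨hm, _⟩ | ⟨hm, _⟩ <;> rw [hm] <;> linarith
theorem G_six {k : Nat} (h : 1 ≤ k) : 5 * G k ≤ G (k + 6) := by
  induction k using Nat.strong_induction_on with
  | _ k IH =>
    by_cases hk : k ≤ 6
    · interval_cases k <;> decide
    · obtain ⟨m, rfl⟩ : ∃ m, k = m + 7 := ⟨k - 7, by omega⟩
      have IH3 := IH (m + 3) (by omega) (by omega)
      have IH2 := IH (m + 2) (by omega) (by omega)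
      have e1 : G (m + 7 + 6) = max (3 * G (m + 9)) (4 * G (m + 8)) := by
        have := G_eq (n := m + 13) (by omega)
        have h4 : m + 13 - 4 = m + 9 := by omega
        have h5 : m + 13 - 5 = m + 8 := by omega
        rw [h4, h5] at this; simpa using this
      have e2 : G (m + 7) = max (3 * G (m + 3)) (4 * G (m + 2)) := by simp [G]
      rw [e1, e2]
      have hl := le_max_left (3 * G (m + 9)) (4 * G (m + 8))
      have hr := le_max_right (3 * G (m + 9)) (4 * G (m + 8))
      rcases max_cases (3 * G (m + 3)) (4 * G (m + 2)) with ⟨hm, _⟩ | ⟨hm, _⟩ <;> rw [hm]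
      · nlinarith
      · nlinarith
theorem term_le {n b : Nat} (h7 : 7 ≤ n) (hb1 : 1 ≤ b) (hb : b + 3 ≤ n) :
    ((n : Int) - b - 1) * G b ≤ G n := by
  induction n using Nat.strong_induction_on generalizing b with
  | _ n IH =>
    have hGb : 0 ≤ G b := G_nonneg b
    rcases (by omega : b + 3 = n ∨ b + 4 = n ∨ b + 5 = n ∨ b + 6 = n ∨ b + 7 ≤ n) with
      h | h | h | h | h
    · -- multiplier 2
      obtain ⟨j, rfl⟩ : ∃ j, b = j + 4 := ⟨b - 4, by omega⟩
      subst h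
      have e : G (j + 4 + 3) = max (3 * G (j + 3)) (4 * G (j + 2)) := by
        show G (j + 7) = _ ; simp [G]
      have hr : 2 * G (j + 4) ≤ 3 * G (j + 3) := G_ratio (by omega)
      have hml := le_max_left (3 * G (j + 3)) (4 * G (j + 2))
      have hc : ((j + 4 + 3 : Nat) : Int) - ((j + 4 : Nat) : Int) - 1 = 2 := by push_cast; ring
      rw [e, hc]; linarith
    · -- multiplier 3
      obtain ⟨j, rfl⟩ : ∃ j, b = j + 3 := ⟨b - 3, by omega⟩
      subst h
      have e : G (j + 3 + 4) = max (3 * G (j + 3)) (4 * G (j + 2)) := by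
        show G (j + 7) = _ ; simp [G]
      have hml := le_max_left (3 * G (j + 3)) (4 * G (j + 2))
      have hc : ((j + 3 + 4 : Nat) : Int) - ((j + 3 : Nat) : Int) - 1 = 3 := by push_cast; ring
      rw [e, hc]; linarith
    · -- multiplier 4
      obtain ⟨j, rfl⟩ : ∃ j, b = j + 2 := ⟨b - 2, by omega⟩
      subst h
      have e : G (j + 2 + 5) = max (3 * G (j + 3)) (4 * G (j + 2)) := by
        show G (j + 7) = _ ; simp [G]
      have hmr := le_max_right (3 * G (j + 3)) (4 * G (j + 2))
      have hc : ((j + 2 + 5 : Nat) : Int) - ((j + 2 : Nat) : Int) - 1 = 4 := by push_cast; ring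
      rw [e, hc]; linarith
    · -- multiplier 5
      subst h
      have hs : 5 * G b ≤ G (b + 6) := G_six hb1
      have hc : ((b + 6 : Nat) : Int) - ((b : Nat) : Int) - 1 = 5 := by push_cast; ring
      rw [hc]; linarith
    · -- multiplier ≥ 6: reduce through G (n - 4)
      by_cases hn : n ≤ 10
      · have hbu : b ≤ 3 := by omega
        interval_cases n <;> interval_cases b <;> first | decide | omega
      · have h4 : 7 ≤ n - 4 := by omega
        have hIH : ((n - 4 : Nat) : Int) - b - 1 ≤ (n : Int) - b - 5 := by
          push_cast [Nat.cast_sub (by omega : 4 ≤ n)]; ring_nf; omega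
        have hIH' := IH (n - 4) (by omega) (h7 := h4) (hb1 := hb1) (hb := by omega)
        have hIHc : ((n : Int) - b - 5) * G b ≤ G (n - 4) := by
          calc ((n : Int) - b - 5) * G b = (((n : Nat) : Int) - 4 - b - 1) * G b := by ring
          _ = (((n - 4 : Nat)) : Int) * G b - (b + 1) * G b := by
              rw [Nat.cast_sub (by omega : 4 ≤ n)]; ring
          _ = (((n - 4 : Nat) : Int) - b - 1) * G b := by ring
          _ ≤ G (n - 4) := hIH'
        have hmax : 3 * G (n - 4) ≤ G n := by
          rw [G_eq (by omega : 7 ≤ n)]; exact le_max_left _ _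
        have hprod : 0 ≤ ((n : Int) - b - 7) * G b :=
          mul_nonneg (by push_cast; omega) hGb
        nlinarith

theorem mem_pyRange_down {a x : Int} : x ∈ PySem.List.pyRange a 0 (-1) ↔ 1 ≤ x ∧ x ≤ a := by
  simp only [PySem.List.pyRange]
  norm_num [List.mem_map, List.mem_range]
  split_ifs with h
  · constructor
    · rintro ⟨k, hk, rfl⟩; omega
    · rintro ⟨h1, h2⟩; exact ⟨(a - x).toNat, by omega, by omega⟩
  · simp; omega

def innerF (n : Int) (d : List Int) (b : Int) : List Int :=
  let c := (n - b - 1) * PySem.List.pyGetD d (b - 1) 0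
  PySem.List.pySetD d (n - 1) (max c (PySem.List.pyGetD d (n - 1) 0))

theorem inner_fold (n : Int) (hn : 7 ≤ n) :
    ∀ (L : List Int) (d : List Int), (n - 1).toNat < d.length →
    (∀ b ∈ L, 1 ≤ b ∧ b ≤ n - 3) →
    L.foldl (innerF n) d
      = d.set (n - 1).toNat
          (L.foldl (fun acc b => max ((n - b - 1) * PySem.List.pyGetD d (b - 1) 0) acc)
                   (PySem.List.pyGetD d (n - 1) 0))
  | [], d, hlen, _ => by
      simp only [List.foldl_nil]
      rw [PySem.List.pyGetD_eq_getElem d 0 (by omega) (by exact_mod_cast by omega)]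
      · exact (List.set_getElem_self hlen).symm
  | b :: L, d, hlen, hb => by
      have hb0 := hb b (List.mem_cons_self)
      have h0b : (0:Int) ≤ b - 1 := by omega
      have hblt : (b - 1).toNat < (n - 1).toNat := by omega
      have hblen : (b - 1).toNat < d.length := by omega
      -- the first iteration
      have hstep : innerF n d b
          = d.set (n - 1).toNat
              (max ((n - b - 1) * PySem.List.pyGetD d (b - 1) 0) (PySem.List.pyGetD d (n - 1) 0)) := by
        simp only [innerF]
        rw [PySem.List.pySetD_of_nonneg d _ (by omega)]
      set v0 := max ((n - b - 1) * PySem.List.pyGetD d (b - 1) 0) (PySem.List.pyGetD d (n - 1) 0) with hv0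
      set d' := d.set (n - 1).toNat v0 with hd'
      have hlen' : (n - 1).toNat < d'.length := by simpa [hd'] using hlen
      have hIH := inner_fold n hn L d' hlen' (fun b' hb' => hb b' (List.mem_cons_of_mem _ hb'))
      -- reads from d' at b'-1 equal reads from d
      have hread : ∀ b' ∈ L, PySem.List.pyGetD d' (b' - 1) 0 = PySem.List.pyGetD d (b' - 1) 0 := by
        intro b' hb'
        have h1 := hb b' (List.mem_cons_of_mem _ hb')
        have hlt : (b' - 1).toNat < (n - 1).toNat := by omega
        have hl1 : (b' - 1).toNat < d.length := by omega
        rw [PySem.List.pyGetD_eq_getElem d' 0 (by omega) (by rw [hd']; simp; omega),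
            PySem.List.pyGetD_eq_getElem d 0 (by omega) (by omega)]
        exact List.getElem_set_ne (l := d) (i := (n - 1).toNat) (by omega) (by simpa using hl1)
      have hv0' : PySem.List.pyGetD d' (n - 1) 0 = v0 := by
        rw [PySem.List.pyGetD_eq_getElem d' 0 (by omega) (by rw [hd']; simp; omega)]
        simp [hd', List.getElem_set]
      calc (b :: L).foldl (innerF n) d = L.foldl (innerF n) d' := by
            rw [List.foldl_cons, hstep, hd', hv0]
        _ = d'.set (n - 1).toNat
              (L.foldl (fun acc b' => max ((n - b' - 1) * PySem.List.pyGetD d' (b' - 1) 0) acc)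
                       (PySem.List.pyGetD d' (n - 1) 0)) := hIH
        _ = d.set (n - 1).toNat
              (L.foldl (fun acc b' => max ((n - b' - 1) * PySem.List.pyGetD d (b' - 1) 0) acc) v0) := by
            rw [hv0']
            rw [PySem.List.foldl_congr_mem L _ _ v0
                  (fun acc b' hb' => by rw [hread b' hb'])]
            rw [hd', List.set_set]
        _ = d.set (n - 1).toNat
              ((b :: L).foldl (fun acc b' => max ((n - b' - 1) * PySem.List.pyGetD d (b' - 1) 0) acc)
                       (PySem.List.pyGetD d (n - 1) 0)) := by
            rw [List.foldl_cons]

theorem foldl_max_le {f : Int → Int} :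
    ∀ (L : List Int) (a M : Int), a ≤ M → (∀ b ∈ L, f b ≤ M) →
      L.foldl (fun acc b => max (f b) acc) a ≤ M
  | [], a, M, ha, _ => ha
  | b :: L, a, M, ha, hf =>
      foldl_max_le L _ M (max_le (hf b List.mem_cons_self) ha)
        (fun b' h => hf b' (List.mem_cons_of_mem _ h))

theorem le_foldl_max_init {f : Int → Int} :
    ∀ (L : List Int) (a : Int), a ≤ L.foldl (fun acc b => max (f b) acc) a
  | [], a => le_refl a
  | b :: L, a => le_trans (le_max_right _ _) (le_foldl_max_init L _)

theorem le_foldl_max_mem {f : Int → Int} :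
    ∀ (L : List Int) (b : Int), b ∈ L → ∀ a, f b ≤ L.foldl (fun acc b => max (f b) acc) a
  | b' :: L, b, hb, a => by
      rcases List.mem_cons.mp hb with rfl | h
      · exact le_trans (le_max_left _ _) (le_foldl_max_init L _)
      · exact le_foldl_max_mem L b h _

theorem scalar_fold (n : Nat) (hn : 7 ≤ n) (d : List Int)
    (hvals : ∀ b : Int, 1 ≤ b → b ≤ (n : Int) - 3 → PySem.List.pyGetD d (b - 1) 0 = G b.toNat)
    (hinit : PySem.List.pyGetD d ((n : Int) - 1) 0 = 0) :
    (PySem.List.pyRange ((n : Int) - 3) 0 (-1)).foldl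
        (fun acc b => max (((n : Int) - b - 1) * PySem.List.pyGetD d (b - 1) 0) acc)
        (PySem.List.pyGetD d ((n : Int) - 1) 0) = G n := by
  rw [hinit]
  apply le_antisymm
  · apply foldl_max_le _ _ _ (G_nonneg n)
    intro b hb
    rcases mem_pyRange_down.mp hb with ⟨hb1, hb2⟩
    rw [hvals b hb1 hb2]
    have : ((n : Int) - b - 1) = ((n : Int) - (b.toNat : Int) - 1) := by omega
    rw [this]
    exact term_le hn (by omega) (by omega)
  · have h4 : ((n : Int) - 4) ∈ PySem.List.pyRange ((n : Int) - 3) 0 (-1) :=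
      mem_pyRange_down.mpr ⟨by omega, by omega⟩
    have h5 : ((n : Int) - 5) ∈ PySem.List.pyRange ((n : Int) - 3) 0 (-1) :=
      mem_pyRange_down.mpr ⟨by omega, by omega⟩
    have t4 := le_foldl_max_mem (f := fun b => ((n : Int) - b - 1) * PySem.List.pyGetD d (b - 1) 0)
      _ _ h4 0
    have t5 := le_foldl_max_mem (f := fun b => ((n : Int) - b - 1) * PySem.List.pyGetD d (b - 1) 0)
      _ _ h5 0
    simp only at t4 t5
    rw [hvals _ (by omega) (by omega)] at t4
    rw [hvals _ (by omega) (by omega)] at t5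
    have e4 : ((n : Int) - ((n : Int) - 4) - 1) = 3 := by ring
    have e5 : ((n : Int) - ((n : Int) - 5) - 1) = 4 := by ring
    rw [e4] at t4; rw [e5] at t5
    have c4 : ((n : Int) - 4).toNat = n - 4 := by omega
    have c5 : ((n : Int) - 5).toNat = n - 5 := by omega
    rw [c4] at t4; rw [c5] at t5
    rw [G_eq hn]
    exact max_le t4 t5

theorem init_array (s : Nat) :
    (PySem.List.pyRange 1 7 1).foldl (fun d i => PySem.List.pySetD d (i - 1) i)
        (List.replicate (6 + s) (0 : Int))
      = [1, 2, 3, 4, 5, 6] ++ List.replicate s 0 := by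
  have hr : PySem.List.pyRange 1 7 1 = [1, 2, 3, 4, 5, 6] := by decide
  have hrep : List.replicate (6 + s) (0 : Int)
      = 0 :: 0 :: 0 :: 0 :: 0 :: 0 :: List.replicate s 0 := by
    rw [List.replicate_add]; rfl
  rw [hr, hrep]
  simp only [List.foldl_cons, List.foldl_nil]
  norm_num [PySem.List.pySetD_of_nonneg]
  rfl

theorem altLoop_G : ∀ (k j : Nat),
    altLoop k (G (j + 2), G (j + 3), G (j + 4), G (j + 5), G (j + 6))
      = (G (k + j + 2), G (k + j + 3), G (k + j + 4), G (k + j + 5), G (k + j + 6))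
  | 0, j => by simp [altLoop]
  | k + 1, j => by
      show altLoop k (G (j + 3), G (j + 4), G (j + 5), G (j + 6),
            max (3 * G (j + 3)) (4 * G (j + 2))) = _
      have hm : max (3 * G (j + 3)) (4 * G (j + 2)) = G (j + 7) := by simp [G]
      rw [hm]
      have := altLoop_G k (j + 1)
      have e2 : j + 1 + 2 = j + 3 := by omega
      have e3 : j + 1 + 3 = j + 4 := by omega
      have e4 : j + 1 + 4 = j + 5 := by omega
      have e5 : j + 1 + 5 = j + 6 := by omega
      have e6 : j + 1 + 6 = j + 7 := by omega
      rw [e2, e3, e4, e5, e6] at this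
      rw [this]
      have f2 : k + (j + 1) + 2 = k + 1 + j + 2 := by omega
      have f3 : k + (j + 1) + 3 = k + 1 + j + 3 := by omega
      have f4 : k + (j + 1) + 4 = k + 1 + j + 4 := by omega
      have f5 : k + (j + 1) + 5 = k + 1 + j + 5 := by omega
      have f6 : k + (j + 1) + 6 = k + 1 + j + 6 := by omega
      rw [f2, f3, f4, f5, f6]

theorem alt_eq (N : Int) (h : ¬ N ≤ 6) : optimalKeys_alt N = G N.toNat := by
  unfold optimalKeys_alt
  rw [if_neg h]
  have h0 : ((2 : Int), (3 : Int), (4 : Int), (5 : Int), (6 : Int))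
      = (G 2, G 3, G 4, G 5, G 6) := by decide
  rw [h0]
  have := altLoop_G (N + 1 - 7).toNat 0
  simp only [Nat.add_zero, Nat.zero_add] at this
  rw [this]
  have : (N + 1 - 7).toNat + 6 = N.toNat := by omega
  rw [this]

def outerF (d : List Int) (n : Int) : List Int :=
  (PySem.List.pyRange (n - 3) 0 (-1)).foldl (fun d b =>
    let c := (n - b - 1) * PySem.List.pyGetD d (b - 1) 0
    PySem.List.pySetD d (n - 1) (max c (PySem.List.pyGetD d (n - 1) 0))) d

theorem outer_loop (N : Int) :
    ∀ (k : Nat) (m : Int), 7 ≤ m → m + k = N + 1 →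
    ∀ d : List Int, d.length = N.toNat →
    (∀ j : Nat, j < d.length → d.getD j 0 = if (j : Int) + 1 < m then G (j + 1) else 0) →
    ∀ j : Nat, j < N.toNat →
    ((PySem.List.pyRange m (N + 1) 1).foldl outerF d).getD j 0
      = if (j : Int) + 1 < N + 1 then G (j + 1) else 0
  | 0, m, hm, hk, d, hlen, hinv, j, hj => by
      rw [PySem.List.pyRange_one_eq_nil (by omega)]
      simp only [List.foldl_nil]
      have := hinv j (by omega)
      rw [this]
      have : m = N + 1 := by omega
      rw [this]
  | k + 1, m, hm, hk, d, hlen, hinv, j, hj => by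
      rw [PySem.List.pyRange_one_cons (by omega)]
      rw [List.foldl_cons]
      -- one outer iteration at n = m
      have hjm : (m - 1).toNat < d.length := by omega
      have hstep : outerF d m
          = d.set (m - 1).toNat (G m.toNat) := by
        unfold outerF
        show (PySem.List.pyRange (m - 3) 0 (-1)).foldl (innerF m) d = _
        rw [inner_fold m (by omega) _ d hjm
              (fun b hb => mem_pyRange_down.mp hb)]
        congr 1
        have hmn : m = ((m.toNat : Nat) : Int) := by omega
        have hvals : ∀ b : Int, 1 ≤ b → b ≤ (m.toNat : Int) - 3 →
            PySem.List.pyGetD d (b - 1) 0 = G b.toNat := by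
          intro b hb1 hb2
          have hbl : (b - 1).toNat < d.length := by omega
          rw [PySem.List.pyGetD_eq_getElem d 0 (by omega) (by omega)]
          have := hinv (b - 1).toNat (by omega)
          rw [List.getD_eq_getElem d 0 hbl] at this
          rw [this]
          rw [if_pos (by omega)]
          congr 1
          omega
        have hinit : PySem.List.pyGetD d (m - 1) 0 = 0 := by
          rw [PySem.List.pyGetD_eq_getElem d 0 (by omega) (by omega)]
          have := hinv (m - 1).toNat (by omega)
          rw [List.getD_eq_getElem d 0 hjm] at this
          rw [this]
          rw [if_neg (by omega)]
        have := scalar_fold m.toNat (by omega) d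
          (by intro b hb1 hb2; exact hvals b hb1 (by omega)) (by
            have e : ((m.toNat : Nat) : Int) - 1 = m - 1 := by omega
            rw [e]; exact hinit)
        have e3 : ((m.toNat : Nat) : Int) - 3 = m - 3 := by omega
        have e1 : ((m.toNat : Nat) : Int) - 1 = m - 1 := by omega
        rw [e3, e1] at this
        calc (PySem.List.pyRange (m - 3) 0 (-1)).foldl
              (fun acc b => max ((m - b - 1) * PySem.List.pyGetD d (b - 1) 0) acc)
              (PySem.List.pyGetD d (m - 1) 0)
            = (PySem.List.pyRange (m - 3) 0 (-1)).foldl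
              (fun acc b => max ((((m.toNat : Nat) : Int) - b - 1) * PySem.List.pyGetD d (b - 1) 0) acc)
              (PySem.List.pyGetD d (m - 1) 0) := by
              apply PySem.List.foldl_congr_mem
              intro acc b hb
              have : ((m.toNat : Nat) : Int) = m := by omega
              rw [this]
          _ = G m.toNat := this
      rw [hstep]
      -- apply IH with m + 1
      apply outer_loop N k (m + 1) (by omega) (by omega)
      · simpa using hlen
      · intro j' hj'
        have hj'' : j' < d.length := by simpa using hj'
        by_cases hcase : j' = (m - 1).toNat
        · subst hcase
          rw [List.getD_eq_getElem _ 0 (by simpa using hjm)]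
          rw [List.getElem_set_self]
          rw [if_pos (by omega)]
          congr 1
          omega
        · rw [List.getD_eq_getElem _ 0 (by simpa using hj'')]
          rw [List.getElem_set_ne (by omega) (by simpa using hj'')]
          have := hinv j' hj''
          rw [List.getD_eq_getElem d 0 hj''] at this
          rw [this]
          have : ((j' : Int) + 1 < m) ↔ ((j' : Int) + 1 < m + 1) := by
            constructor <;> intro h <;> omega
          by_cases hlt : (j' : Int) + 1 < m
          · rw [if_pos hlt, if_pos (by omega)]
          · rw [if_neg hlt, if_neg (by omega)]
      · exact hj


theorem a_eq (N : Int) (h : ¬ N ≤ 6) : optimalKeys N = G N.toNat := by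
  unfold optimalKeys
  rw [if_neg h]
  have hd1 : (PySem.List.pyRange 1 7 1).foldl (fun d i => PySem.List.pySetD d (i - 1) i)
      (List.replicate N.toNat (0 : Int)) = [1, 2, 3, 4, 5, 6] ++ List.replicate (N.toNat - 6) 0 := by
    have h6 : N.toNat = 6 + (N.toNat - 6) := by omega
    conv_lhs => rw [h6]
    exact init_array _
  simp only []
  rw [hd1]
  have hcast : N - 1 = (((N - 1).toNat : Nat) : Int) := by omega
  rw [hcast, PySem.List.pyGetD_natCast]
  have hlen : ([1, 2, 3, 4, 5, 6] ++ List.replicate (N.toNat - 6) (0 : Int)).length = N.toNat := by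
    simp; omega
  have hres := outer_loop N (N + 1 - 7).toNat 7 (by omega) (by omega)
    ([1, 2, 3, 4, 5, 6] ++ List.replicate (N.toNat - 6) 0) hlen
    (by
      intro j hj
      rw [hlen] at hj
      by_cases hj6 : j < 6
      · rw [if_pos (by omega)]
        interval_cases j <;> rfl
      · rw [if_neg (by omega)]
        rw [List.getD_eq_getElem _ 0 (by simp; omega)]
        rw [List.getElem_append_right (by simp; omega)]
        simp)
    (N - 1).toNat (by omega)
  rw [if_pos (by omega)] at hres
  have hfun : (PySem.List.pyRange 7 (N + 1) 1).foldl
      (fun d n => (PySem.List.pyRange (n - 3) 0 (-1)).foldl (fun d b =>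
          let c := (n - b - 1) * PySem.List.pyGetD d (b - 1) 0
          PySem.List.pySetD d (n - 1) (max c (PySem.List.pyGetD d (n - 1) 0))) d)
      ([1, 2, 3, 4, 5, 6] ++ List.replicate (N.toNat - 6) 0)
      = (PySem.List.pyRange 7 (N + 1) 1).foldl outerF
      ([1, 2, 3, 4, 5, 6] ++ List.replicate (N.toNat - 6) 0) := rfl
  rw [hfun, hres]
  congr 1
  omega

theorem optimalKeys_eq_alt (N : Int) : optimalKeys N = optimalKeys_alt N := by
  by_cases h : N ≤ 6
  · unfold optimalKeys optimalKeys_alt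
    rw [if_pos h, if_pos h]
  · rw [a_eq N h, alt_eq N h]

-- ===== VERDICT (by name: the statement is the Claim_ definition above) =====
theorem optimalKeys_spec : Claim_equal_optimalKeys := by
  intro N _
  unfold Spec_optimalKeys
  exact optimalKeys_eq_alt N
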